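-- pv_equiv track=rewrite | github.com/wahchachaps/CPCT-Dashboard | app.py | find_cp_sheet
-- ===== SOURCE A (Python) =====
-- def find_cp_sheet(sheet_names):
--     for name in sheet_names:
--         lower = name.lower().strip()
--         if lower.startswith("cp "):
--             return name
--     for name in sheet_names:
--         lower = name.lower().strip()
--         if lower == "energy":
--             return name
--     for name in sheet_names:
--         lower = name.lower()
--         if "cp" in lower and "january" in lower:
--             return name
--     for name in sheet_names:
--         lower = name.lower()
--         if "cp" in lower:
--             return name
--     return None
-- ===== SOURCE B (Python) =====
-- def find_cp_sheet(sheet_names):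
--     slot_cp_prefix = slot_energy = slot_cp_january = slot_cp = None
--     for name in sheet_names:
--         lower = name.lower()
--         stripped = lower.strip()
--         if slot_cp_prefix is None and stripped.startswith("cp "):
--             slot_cp_prefix = name
--         if slot_energy is None and stripped == "energy":
--             slot_energy = name
--         if slot_cp_january is None and "cp" in lower and "january" in lower:
--             slot_cp_january = name
--         if slot_cp is None and "cp" in lower:
--             slot_cp = name
--     for slot in (slot_cp_prefix, slot_energy, slot_cp_january, slot_cp):
--         if slot is not None:
--             return slot
--     return None
-- ===== Notes on version B (the rewrite author's own statement) =====
-- stated objective: faster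
-- what changed: Replaces A's four sequential full scans (each redoing lower/strip) by a single pass that records the first match for each of the four priority tiers and returns the highest-priority non-empty slot.
import Mathlib
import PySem

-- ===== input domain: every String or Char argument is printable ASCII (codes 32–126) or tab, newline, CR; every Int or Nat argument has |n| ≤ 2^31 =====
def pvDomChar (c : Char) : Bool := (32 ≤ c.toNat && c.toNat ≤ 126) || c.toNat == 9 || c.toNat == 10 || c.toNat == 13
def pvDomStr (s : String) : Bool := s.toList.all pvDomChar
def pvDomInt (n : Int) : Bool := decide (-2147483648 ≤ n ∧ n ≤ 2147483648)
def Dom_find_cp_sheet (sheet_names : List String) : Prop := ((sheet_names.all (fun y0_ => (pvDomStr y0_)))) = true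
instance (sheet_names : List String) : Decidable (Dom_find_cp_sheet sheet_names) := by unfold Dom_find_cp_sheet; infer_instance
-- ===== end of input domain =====

-- ===== PORT A =====
-- A: four sequential scans, each returning the first name matching its tier's test.
def loopA1 : List String → Option String
  | [] => none
  | name :: rest =>
    let lower := PySem.Str.strip (PySem.Str.lower name)
    if PySem.Str.startswith lower "cp " then some name else loopA1 rest

def loopA2 : List String → Option String
  | [] => none
  | name :: rest =>
    let lower := PySem.Str.strip (PySem.Str.lower name)
    if lower == "energy" then some name else loopA2 rest

def loopA3 : List String → Option String
  | [] => none
  | name :: rest =>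
    let lower := PySem.Str.lower name
    if PySem.Str.isIn "cp" lower && PySem.Str.isIn "january" lower then some name
    else loopA3 rest

def loopA4 : List String → Option String
  | [] => none
  | name :: rest =>
    let lower := PySem.Str.lower name
    if PySem.Str.isIn "cp" lower then some name else loopA4 rest

def find_cp_sheet (sheet_names : List String) : Option String :=
  match loopA1 sheet_names with
  | some n => some n
  | none =>
    match loopA2 sheet_names with
    | some n => some n
    | none =>
      match loopA3 sheet_names with
      | some n => some n
      | none =>
        match loopA4 sheet_names with
        | some n => some n
        | none => none

-- ===== PORT B =====
-- B: ONE pass over the names keeping a first-match slot per tier, then the first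
-- non-empty slot in priority order.  (Same result; normalization done once per name.)
def find_cp_sheet_alt (sheet_names : List String) : Option String :=
  let st := sheet_names.foldl
    (fun (s : Option String × Option String × Option String × Option String) name =>
      let lower := PySem.Str.lower name
      let stripped := PySem.Str.strip lower
      ((if s.1.isNone && PySem.Str.startswith stripped "cp " then some name else s.1),
       (if s.2.1.isNone && (stripped == "energy") then some name else s.2.1),
       (if s.2.2.1.isNone && (PySem.Str.isIn "cp" lower && PySem.Str.isIn "january" lower)
          then some name else s.2.2.1),
       (if s.2.2.2.isNone && PySem.Str.isIn "cp" lower then some name else s.2.2.2)))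
    (none, none, none, none)
  match st.1 with
  | some n => some n
  | none =>
    match st.2.1 with
    | some n => some n
    | none =>
      match st.2.2.1 with
      | some n => some n
      | none =>
        match st.2.2.2 with
        | some n => some n
        | none => none

-- ===== PRECONDITION & SPEC =====
def Spec_find_cp_sheet (sheet_names : List String) (out : Option String) : Prop := out = find_cp_sheet_alt sheet_names
instance (sheet_names : List String) (out : Option String) : Decidable (Spec_find_cp_sheet sheet_names out) := by unfold Spec_find_cp_sheet; infer_instance

-- ===== CLAIM (what is proved, stated in full; the proofs are below) =====
def Claim_equal_find_cp_sheet : Prop := ∀ (sheet_names : List String), Dom_find_cp_sheet sheet_names → Spec_find_cp_sheet sheet_names (find_cp_sheet sheet_names)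

-- ===== LEMMAS AND PROOFS =====

def pTier1 (name : String) : Bool :=
  PySem.Str.startswith (PySem.Str.strip (PySem.Str.lower name)) "cp "
def pTier2 (name : String) : Bool :=
  PySem.Str.strip (PySem.Str.lower name) == "energy"
def pTier3 (name : String) : Bool :=
  PySem.Str.isIn "cp" (PySem.Str.lower name) && PySem.Str.isIn "january" (PySem.Str.lower name)
def pTier4 (name : String) : Bool :=
  PySem.Str.isIn "cp" (PySem.Str.lower name)

theorem loopA1_eq_find? (xs : List String) : loopA1 xs = xs.find? pTier1 := by
  induction xs with
  | nil => rfl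
  | cons n rest ih =>
    simp only [loopA1, List.find?, pTier1, ih]
    cases PySem.Str.startswith (PySem.Str.strip (PySem.Str.lower n)) "cp " <;> simp

theorem loopA2_eq_find? (xs : List String) : loopA2 xs = xs.find? pTier2 := by
  induction xs with
  | nil => rfl
  | cons n rest ih =>
    simp only [loopA2, List.find?, pTier2, ih]
    cases PySem.Str.strip (PySem.Str.lower n) == "energy" <;> simp

theorem loopA3_eq_find? (xs : List String) : loopA3 xs = xs.find? pTier3 := by
  induction xs with
  | nil => rfl
  | cons n rest ih =>
    simp only [loopA3, List.find?, pTier3, ih]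
    cases PySem.Str.isIn "cp" (PySem.Str.lower n) && PySem.Str.isIn "january" (PySem.Str.lower n) <;> simp

theorem loopA4_eq_find? (xs : List String) : loopA4 xs = xs.find? pTier4 := by
  induction xs with
  | nil => rfl
  | cons n rest ih =>
    simp only [loopA4, List.find?, pTier4, ih]
    cases PySem.Str.isIn "cp" (PySem.Str.lower n) <;> simp

theorem slot_step_or (o : Option String) (p : String → Bool) (n : String) (xs : List String) :
    (if o.isNone && p n then some n else o).or (xs.find? p)
      = o.or ((n :: xs).find? p) := by
  cases o with
  | some v => simp
  | none => cases h : p n <;> simp [List.find?, h]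

theorem fold_slots_gen (p1 p2 p3 p4 : String → Bool) (xs : List String)
    (a b c d : Option String) :
    xs.foldl
      (fun (s : Option String × Option String × Option String × Option String) name =>
        ((if s.1.isNone && p1 name then some name else s.1),
         (if s.2.1.isNone && p2 name then some name else s.2.1),
         (if s.2.2.1.isNone && p3 name then some name else s.2.2.1),
         (if s.2.2.2.isNone && p4 name then some name else s.2.2.2)))
      (a, b, c, d)
    = (a.or (xs.find? p1), b.or (xs.find? p2),
       c.or (xs.find? p3), d.or (xs.find? p4)) := by
  induction xs generalizing a b c d with
  | nil => simp
  | cons n rest ih =>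
    simp only [List.foldl_cons]
    rw [ih]
    simp only [slot_step_or]

-- ===== VERDICT (by name: the statement is the Claim_ definition above) =====
theorem find_cp_sheet_spec : Claim_equal_find_cp_sheet := by
  intro xs _
  unfold Spec_find_cp_sheet find_cp_sheet find_cp_sheet_alt
  rw [show (fun (s : Option String × Option String × Option String × Option String) name =>
        let lower := PySem.Str.lower name
        let stripped := PySem.Str.strip lower
        ((if s.1.isNone && PySem.Str.startswith stripped "cp " then some name else s.1),
         (if s.2.1.isNone && (stripped == "energy") then some name else s.2.1),
         (if s.2.2.1.isNone && (PySem.Str.isIn "cp" lower && PySem.Str.isIn "january" lower)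
            then some name else s.2.2.1),
         (if s.2.2.2.isNone && PySem.Str.isIn "cp" lower then some name else s.2.2.2)))
      = (fun (s : Option String × Option String × Option String × Option String) name =>
        ((if s.1.isNone && pTier1 name then some name else s.1),
         (if s.2.1.isNone && pTier2 name then some name else s.2.1),
         (if s.2.2.1.isNone && pTier3 name then some name else s.2.2.1),
         (if s.2.2.2.isNone && pTier4 name then some name else s.2.2.2))) from rfl]
  rw [fold_slots_gen, loopA1_eq_find?, loopA2_eq_find?, loopA3_eq_find?, loopA4_eq_find?]
  simp only [Option.none_or]
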